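-- pv_equiv track=rewrite | github.com/suchot/CS-Notes | docs/offer/猿辅导/1.py | get_max_group
-- ===== SOURCE A (Python) =====
-- def get_max_group(t, p):
--     if t < 3:
--         return 0
--     if t == 3:
--         return min(p)
--     count = 0
--     while True:
--         p.sort(reverse=True)
--         cur = p[2]
--         if cur == 0:
--             break
--         count += cur
--         p[:3] = list(map(lambda x: x - cur, p[:3]))
--     return count
-- ===== SOURCE B (Python) =====
-- def _merge_desc(xs, ys):
--     out = []
--     i = j = 0
--     while i < len(xs) and j < len(ys):
--         if xs[i] >= ys[j]:
--             out.append(xs[i]); i += 1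
--         else:
--             out.append(ys[j]); j += 1
--     out.extend(xs[i:]); out.extend(ys[j:])
--     return out
--
-- def get_max_group(t, p):
--     if t < 3:
--         return 0
--     if t == 3:
--         return min(p)
--     q = sorted(p, reverse=True)
--     count = 0
--     while True:
--         cur = q[2]
--         if cur == 0:
--             break
--         count += cur
--         q = _merge_desc([q[0] - cur, q[1] - cur, 0], q[3:])
--     return count
-- ===== Notes on version B (the rewrite author's own statement) =====
-- stated objective: alternative
-- what changed: Instead of re-sorting the whole pile list on every loop iteration, B sorts once and then merges the three reduced piles back into the still-sorted remainder with a linear merge.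
import Mathlib
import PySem

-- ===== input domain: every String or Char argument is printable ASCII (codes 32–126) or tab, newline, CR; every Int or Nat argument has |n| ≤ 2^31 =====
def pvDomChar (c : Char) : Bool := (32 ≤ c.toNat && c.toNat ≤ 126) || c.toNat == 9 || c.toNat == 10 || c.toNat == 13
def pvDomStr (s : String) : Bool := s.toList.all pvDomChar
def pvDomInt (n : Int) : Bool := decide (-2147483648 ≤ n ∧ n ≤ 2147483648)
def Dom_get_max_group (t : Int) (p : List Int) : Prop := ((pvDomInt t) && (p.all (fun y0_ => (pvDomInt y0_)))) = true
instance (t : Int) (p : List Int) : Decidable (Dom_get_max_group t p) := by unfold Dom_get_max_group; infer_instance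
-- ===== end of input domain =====

-- B replaces A's per-iteration full re-sort of the pile list by one initial sort followed by a
-- linear merge of the three reduced piles back into the still-sorted remainder (objective:
-- alternative). Equivalence is about the RETURN value only: Python A sorts its argument p in
-- place (observable by the caller), B does not mutate p.

-- ===== PORT A =====
-- while True: ported with fuel p.length + 2; the loop performs at most that many iterations
-- (each iteration with cur > 0 turns the third-largest positive pile into 0 and creates no new
-- positive pile; an iteration with cur < 0 makes the third largest 0, so the next breaks).
-- p[2] is read with .getD 0: inside Pre_ the list stays ≥ 3 long, so the default is never used.
def pyLoopA : Nat → Int → List Int → Int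
  | 0, count, _ => count
  | fuel + 1, count, p =>
    let s := PySem.List.sorted p (fun x => x) (reverse := true)   -- p.sort(reverse=True)
    let cur := (PySem.List.pyGet? s 2).getD 0                     -- cur = p[2]
    if cur = 0 then count
    else pyLoopA fuel (count + cur)
      (((PySem.List.slice s none (some 3)).map (fun x => x - cur)) ++ PySem.List.slice s (some 3) none)
      -- p[:3] = list(map(lambda x: x - cur, p[:3]))

def get_max_group (t : Int) (p : List Int) : Int :=
  if t < 3 then 0
  else if t = 3 then (PySem.List.min? p (fun x => x)).getD 0      -- min(p); default unused inside Pre_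
  else pyLoopA (p.length + 2) 0 p

-- ===== PORT B =====
-- linear merge of two descending lists (Source B's _merge_desc, as structural recursion)
def mergeDesc : List Int → List Int → List Int
  | [], ys => ys
  | x :: xs, [] => x :: xs
  | x :: xs, y :: ys =>
    if y ≤ x then x :: mergeDesc xs (y :: ys) else y :: mergeDesc (x :: xs) ys

-- while True: same fuel encoding as A's loop (the state is a permutation of A's, so the same
-- iteration bound applies); q[i] read with .getD 0, never used inside Pre_.
def pyLoopB : Nat → Int → List Int → Int
  | 0, count, _ => count
  | fuel + 1, count, q =>
    let cur := (PySem.List.pyGet? q 2).getD 0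
    if cur = 0 then count
    else pyLoopB fuel (count + cur)
      (mergeDesc [(PySem.List.pyGet? q 0).getD 0 - cur, (PySem.List.pyGet? q 1).getD 0 - cur, 0]
        (PySem.List.slice q (some 3) none))

def get_max_group_alt (t : Int) (p : List Int) : Int :=
  if t < 3 then 0
  else if t = 3 then (PySem.List.min? p (fun x => x)).getD 0
  else pyLoopB (p.length + 2) 0 (PySem.List.sorted p (fun x => x) (reverse := true))

-- ===== PRECONDITION & SPEC =====
-- Pre_ excludes exactly the inputs where Python A raises: min([]) (ValueError) when t == 3,
-- and p[2] (IndexError) when t > 3 and len(p) < 3.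
def Pre_get_max_group (t : Int) (p : List Int) : Prop :=
  (t = 3 → p ≠ []) ∧ (3 < t → 3 ≤ p.length)
instance (t : Int) (p : List Int) : Decidable (Pre_get_max_group t p) := by
  unfold Pre_get_max_group; infer_instance

def pvWitness_get_max_group : Int × List Int := (4, [3, 1, 2, 5])

def Spec_get_max_group (t : Int) (p : List Int) (out : Int) : Prop := out = get_max_group_alt t p
instance (t : Int) (p : List Int) (out : Int) : Decidable (Spec_get_max_group t p out) := by
  unfold Spec_get_max_group; infer_instance

-- ===== CLAIM (what is proved, stated in full; the proofs are below) =====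
def Claim_equal_get_max_group : Prop :=
  ∀ (t : Int) (p : List Int), Dom_get_max_group t p → Pre_get_max_group t p →
    Spec_get_max_group t p (get_max_group t p)

-- ===== LEMMAS AND PROOFS =====

theorem mergeDesc_perm (xs ys : List Int) : (mergeDesc xs ys).Perm (xs ++ ys) := by
  fun_induction mergeDesc xs ys with
  | case1 ys => simp
  | case2 x xs => simp
  | case3 x xs y ys h ih =>
    exact (ih.cons x).trans (by simp)
  | case4 x xs y ys h ih =>
    refine (ih.cons y).trans ?_
    exact List.Perm.trans (List.Perm.refl _) (List.perm_middle.symm)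

theorem mem_mergeDesc {z : Int} {xs ys : List Int} (h : z ∈ mergeDesc xs ys) :
    z ∈ xs ∨ z ∈ ys := by
  have := (mergeDesc_perm xs ys).mem_iff.mp h
  simpa using this

theorem mergeDesc_pairwise {xs ys : List Int}
    (hx : xs.Pairwise (fun a b => b ≤ a)) (hy : ys.Pairwise (fun a b => b ≤ a)) :
    (mergeDesc xs ys).Pairwise (fun a b => b ≤ a) := by
  fun_induction mergeDesc xs ys with
  | case1 ys => simpa using hy
  | case2 x xs => simpa using hx
  | case3 x xs y ys h ih =>
    rw [List.pairwise_cons] at hx ⊢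
    refine ⟨?_, ih hx.2 hy⟩
    intro z hz
    rcases mem_mergeDesc hz with hzx | hzy
    · exact hx.1 z hzx
    · rcases List.mem_cons.mp hzy with rfl | hzy
      · exact h
      · exact le_trans ((List.pairwise_cons.mp hy).1 z hzy) h
  | case4 x xs y ys h ih =>
    rw [List.pairwise_cons] at hy ⊢
    refine ⟨?_, ih hx hy.2⟩
    intro z hz
    rcases mem_mergeDesc hz with hzx | hzy
    · rcases List.mem_cons.mp hzx with rfl | hzx
      · exact le_of_not_ge h
      · exact le_trans ((List.pairwise_cons.mp hx).1 z hzx) (le_of_not_ge h)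
    · exact hy.1 z hzy

-- two descending lists with the same multiset are equal
theorem desc_sorted_unique {l₁ l₂ : List Int} (hp : l₁.Perm l₂)
    (h₁ : l₁.Pairwise (fun a b => b ≤ a)) (h₂ : l₂.Pairwise (fun a b => b ≤ a)) : l₁ = l₂ :=
  hp.eq_of_pairwise (fun _ _ _ _ hab hba => le_antisymm hba hab) h₁ h₂

-- the loops agree when B's state is the descending-sorted version of A's state
theorem loop_agree : ∀ (fuel : Nat) (count : Int) (p q : List Int),
    q.Perm p → q.Pairwise (fun a b => b ≤ a) →
    pyLoopA fuel count p = pyLoopB fuel count q := by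
  intro fuel
  induction fuel with
  | zero => intro count p q _ _; rfl
  | succ f ih =>
    intro count p q hperm hpair
    have hs : PySem.List.sorted p (fun x => x) (reverse := true) = q := by
      refine desc_sorted_unique ?_ ?_ hpair
      · exact (PySem.List.sorted_perm p (fun x => x) true).trans hperm.symm
      · simpa using PySem.List.sorted_pairwise_rev (xs := p) (key := fun x => x)
    show pyLoopA (f + 1) count p = pyLoopB (f + 1) count q
    simp only [pyLoopA, pyLoopB, hs]
    match q, hpair with
    | [], _ => simp [PySem.List.pyGet?, PySem.List.pyIdx?]
    | [a], _ => simp [PySem.List.pyGet?, PySem.List.pyIdx?]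
    | [a, b], _ => simp [PySem.List.pyGet?, PySem.List.pyIdx?]
    | a :: b :: c :: r, hpair =>
      have hget2 : (PySem.List.pyGet? (a :: b :: c :: r) 2).getD 0 = c := by
        rw [show ((2 : Int)) = ((2 : Nat) : Int) by norm_num, PySem.List.pyGet?_natCast]; rfl
      have hget0 : (PySem.List.pyGet? (a :: b :: c :: r) 0).getD 0 = a := by
        rw [show ((0 : Int)) = ((0 : Nat) : Int) by norm_num, PySem.List.pyGet?_natCast]; rfl
      have hget1 : (PySem.List.pyGet? (a :: b :: c :: r) 1).getD 0 = b := by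
        rw [show ((1 : Int)) = ((1 : Nat) : Int) by norm_num, PySem.List.pyGet?_natCast]; rfl
      rw [hget0, hget1, hget2]
      by_cases hc : c = 0
      · simp [hc]
      · rw [if_neg hc, if_neg hc]
        have hslice3 : PySem.List.slice (a :: b :: c :: r) (some 3) none = r := by
          have : ((3 : Int)) = ((3 : Nat) : Int) := by norm_num
          rw [this, PySem.List.slice_from_natCast]; rfl
        have hsliceTo3 : PySem.List.slice (a :: b :: c :: r) none (some 3) = [a, b, c] := by
          have : ((3 : Int)) = ((3 : Nat) : Int) := by norm_num
          rw [this, PySem.List.slice_to_natCast]; rfl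
        rw [hslice3, hsliceTo3]
        -- order facts from the sorted state
        have hba : b ≤ a := (List.pairwise_cons.mp hpair).1 b (by simp)
        have hcb : c ≤ b := by
          have := (List.pairwise_cons.mp (List.pairwise_cons.mp hpair).2)
          exact this.1 c (by simp)
        have hr : ∀ z ∈ r, z ≤ c := by
          have h2 := (List.pairwise_cons.mp
            (List.pairwise_cons.mp (List.pairwise_cons.mp hpair).2).2)
          exact h2.1
        have hrpair : r.Pairwise (fun a b => b ≤ a) := by
          have h2 := (List.pairwise_cons.mp
            (List.pairwise_cons.mp (List.pairwise_cons.mp hpair).2).2)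
          exact h2.2
        refine ih (count + c) _ _ ?_ ?_
        · refine (mergeDesc_perm _ _).trans ?_
          simp [List.map]
        · refine mergeDesc_pairwise ?_ hrpair
          refine List.pairwise_cons.mpr ⟨?_, List.pairwise_cons.mpr ⟨?_, by simp⟩⟩
          · intro z hz
            rcases List.mem_cons.mp hz with rfl | hz
            · omega
            · simp at hz; omega
          · intro z hz; simp at hz; omega

-- ===== VERDICT (by name: the statement is the Claim_ definition above) =====
theorem get_max_group_spec : Claim_equal_get_max_group := by
  unfold Claim_equal_get_max_group
  intro t p _ _
  unfold Spec_get_max_group get_max_group get_max_group_alt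
  by_cases h1 : t < 3
  · simp [h1]
  · by_cases h2 : t = 3
    · simp [h2]
    · rw [if_neg h1, if_neg h2, if_neg h1, if_neg h2]
      refine loop_agree _ 0 p _ (PySem.List.sorted_perm p (fun x => x) true) ?_
      simpa using PySem.List.sorted_pairwise_rev (xs := p) (key := fun x => x)
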